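-- pv_equiv track=rewrite | github.com/pypi-data/pypi-mirror-400 | packages/adafruit-circuitpython-usb-host-descriptors/adafruit_circuitpython_usb_host_descriptors-0.5.0-py3-none-any.whl/adafruit_usb_host_descriptors.py | _is_confirmed_usage
-- ===== SOURCE A (Python) =====
-- HID_TAG_USAGE_PAGE = 0x05  # Defines the category (e.g., Generic Desktop, Game Controls)
--
-- HID_TAG_USAGE = 0x09  # Defines the specific item (e.g., Mouse, Joystick)
--
-- USAGE_PAGE_GENERIC_DESKTOP = 0x01
--
-- def _is_confirmed_usage(report_desc, usage_type):
--     """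
--     Scans the raw descriptor bytes for:
--     Usage Page (Generic Desktop) = 0x05, 0x01
--     Usage (Mouse)                = 0x09, 0x02
--     """
--     if not report_desc:
--         return False
--
--     # Simple byte scan check
--     # We look for Usage Page Generic Desktop (0x05 0x01)
--     has_generic_desktop = False
--     for i in range(len(report_desc) - 1):
--         if (
--             report_desc[i] == HID_TAG_USAGE_PAGE
--             and report_desc[i + 1] == USAGE_PAGE_GENERIC_DESKTOP
--         ):
--             has_generic_desktop = True
--
--     # We look for Usage Mouse (0x09 0x02)
--     has_usage_type = False
--     for i in range(len(report_desc) - 1):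
--         if report_desc[i] == HID_TAG_USAGE and report_desc[i + 1] == usage_type:
--             has_usage_type = True
--
--     return has_generic_desktop and has_usage_type
-- ===== SOURCE B (Python) =====
-- HID_TAG_USAGE_PAGE = 0x05
-- HID_TAG_USAGE = 0x09
-- USAGE_PAGE_GENERIC_DESKTOP = 0x01
--
-- def _is_confirmed_usage(report_desc, usage_type):
--     # Single streaming pass: walk the bytes once keeping only the previous byte
--     # and two monotone flags, short-circuiting as soon as both patterns were seen.
--     it = iter(report_desc)
--     try:
--         prev = next(it)
--     except StopIteration:
--         return False
--     has_page = has_usage = False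
--     for cur in it:
--         if prev == HID_TAG_USAGE_PAGE and cur == USAGE_PAGE_GENERIC_DESKTOP:
--             has_page = True
--         if prev == HID_TAG_USAGE and cur == usage_type:
--             has_usage = True
--         if has_page and has_usage:
--             return True
--         prev = cur
--     return False
-- ===== Notes on version B (the rewrite author's own statement) =====
-- stated objective: alternative
-- what changed: Replaces A's two staged index-based full scans with separate flag loops by one streaming state-machine pass over an iterator that keeps only the previous byte, updates both flags simultaneously and returns early once both patterns have been seen.
import Mathlib
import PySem

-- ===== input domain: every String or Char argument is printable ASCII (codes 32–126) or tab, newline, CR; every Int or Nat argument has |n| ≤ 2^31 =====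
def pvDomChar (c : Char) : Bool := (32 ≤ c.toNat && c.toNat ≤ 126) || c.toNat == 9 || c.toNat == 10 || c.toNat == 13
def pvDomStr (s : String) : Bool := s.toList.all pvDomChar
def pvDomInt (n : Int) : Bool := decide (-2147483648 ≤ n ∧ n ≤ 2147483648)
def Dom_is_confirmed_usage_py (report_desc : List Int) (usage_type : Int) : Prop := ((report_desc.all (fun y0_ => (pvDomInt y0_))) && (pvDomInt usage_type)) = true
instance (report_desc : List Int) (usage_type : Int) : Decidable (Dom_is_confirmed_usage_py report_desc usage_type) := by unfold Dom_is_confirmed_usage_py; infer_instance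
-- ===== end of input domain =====

-- ===== PORT A =====
-- B replaces A's two staged index-loop scans by one streaming state-machine pass
-- (previous byte + two flags, early exit once both are set); objective: alternative.
def is_confirmed_usage_py (report_desc : List Int) (usage_type : Int) : Bool :=
  if report_desc = [] then false
  else
    let has_generic_desktop :=
      (PySem.List.pyRange 0 ((report_desc.length : Int) - 1) 1).foldl
        (fun acc i =>
          if PySem.List.pyGetD report_desc i 0 = 5 ∧ PySem.List.pyGetD report_desc (i + 1) 0 = 1
          then true else acc) false
    let has_usage_type :=
      (PySem.List.pyRange 0 ((report_desc.length : Int) - 1) 1).foldl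
        (fun acc i =>
          if PySem.List.pyGetD report_desc i 0 = 9 ∧ PySem.List.pyGetD report_desc (i + 1) 0 = usage_type
          then true else acc) false
    has_generic_desktop && has_usage_type

-- ===== PORT B =====
-- the `for cur in it` loop of Source B: state = (prev, has_page, has_usage), early return on both flags
def icuAltGo (usage_type prev : Int) (has_page has_usage : Bool) : List Int → Bool
  | [] => false
  | cur :: rest =>
    let has_page := if prev = 5 ∧ cur = 1 then true else has_page
    let has_usage := if prev = 9 ∧ cur = usage_type then true else has_usage
    if has_page && has_usage then true else icuAltGo usage_type cur has_page has_usage rest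

def is_confirmed_usage_py_alt (report_desc : List Int) (usage_type : Int) : Bool :=
  match report_desc with
  | [] => false                       -- `next(it)` raises StopIteration
  | prev :: rest => icuAltGo usage_type prev false false rest

-- ===== PRECONDITION & SPEC =====
def Spec_is_confirmed_usage_py (report_desc : List Int) (usage_type : Int) (out : Bool) : Prop := out = is_confirmed_usage_py_alt report_desc usage_type
instance (report_desc : List Int) (usage_type : Int) (out : Bool) : Decidable (Spec_is_confirmed_usage_py report_desc usage_type out) := by unfold Spec_is_confirmed_usage_py; infer_instance

-- ===== CLAIM (what is proved, stated in full; the proofs are below) =====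
def Claim_equal_is_confirmed_usage_py : Prop := ∀ (report_desc : List Int) (usage_type : Int), Dom_is_confirmed_usage_py report_desc usage_type → Spec_is_confirmed_usage_py report_desc usage_type (is_confirmed_usage_py report_desc usage_type)

-- ===== LEMMAS AND PROOFS =====

-- a flag-setting fold is `any`
theorem flag_foldl (p : Int → Prop) [DecidablePred p] (l : List Int) (b : Bool) :
    l.foldl (fun acc i => if p i then true else acc) b = (b || l.any (fun i => decide (p i))) := by
  induction l generalizing b with
  | nil => simp
  | cons x xs ih =>
    simp only [List.foldl_cons, List.any_cons, ih]
    by_cases h : p x <;> simp [h]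

-- membership of a pair in `zip xs xs.tail` is existence of an adjacent occurrence
theorem mem_zip_tail_iff (rd : List Int) (a b : Int) :
    (a, b) ∈ rd.zip rd.tail ↔ ∃ k, k < rd.length - 1 ∧ rd.getD k 0 = a ∧ rd.getD (k + 1) 0 = b := by
  constructor
  · intro h
    rcases List.mem_iff_getElem.mp h with ⟨i, hi, hget⟩
    have hlen : i < rd.length - 1 := by
      simpa [List.length_zip, List.length_tail] using hi
    refine ⟨i, hlen, ?_, ?_⟩
    · have h1 : i < rd.length := by omega
      rw [List.getD_eq_getElem rd 0 h1]
      have := (List.getElem_zip (l := rd) (l' := rd.tail) (i := i) (h := hi))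
      rw [this] at hget
      exact (Prod.mk.injEq _ _ _ _).mp hget |>.1
    · have h2 : i + 1 < rd.length := by omega
      rw [List.getD_eq_getElem rd 0 h2]
      have := (List.getElem_zip (l := rd) (l' := rd.tail) (i := i) (h := hi))
      rw [this] at hget
      have ht := (Prod.mk.injEq _ _ _ _).mp hget |>.2
      rw [List.getElem_tail] at ht
      exact ht
  · rintro ⟨k, hk, ha, hb⟩
    have hzlen : k < (rd.zip rd.tail).length := by
      simp [List.length_zip, List.length_tail]; omega
    refine List.mem_iff_getElem.mpr ⟨k, hzlen, ?_⟩
    rw [List.getElem_zip]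
    have h1 : k < rd.length := by omega
    have h2 : k + 1 < rd.length := by omega
    rw [List.getD_eq_getElem rd 0 h1] at ha
    rw [List.getD_eq_getElem rd 0 h2] at hb
    simp [List.getElem_tail, ha, hb]

-- one scan loop of A equals one adjacent-pair membership test
theorem scan_eq_contains (rd : List Int) (a b : Int) :
    ((PySem.List.pyRange 0 ((rd.length : Int) - 1) 1).foldl
      (fun acc i =>
        if PySem.List.pyGetD rd i 0 = a ∧ PySem.List.pyGetD rd (i + 1) 0 = b
        then true else acc) false)
    = (rd.zip rd.tail).contains (a, b) := by
  rw [flag_foldl]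
  rw [PySem.List.pyRange_one]
  have hcast : ((rd.length : Int) - 1 - 0).toNat = rd.length - 1 := by omega
  rw [hcast]
  apply Bool.coe_iff_coe.mp
  simp only [Bool.false_or, List.any_eq_true, List.mem_map, List.mem_range,
    decide_eq_true_eq, List.contains_eq_mem, mem_zip_tail_iff]
  constructor
  · rintro ⟨i, ⟨k, hk, rfl⟩, h1, h2⟩
    refine ⟨k, hk, ?_, ?_⟩
    · have : (0 : Int) + (k : Int) = (k : Nat) := by omega
      rw [this, PySem.List.pyGetD_natCast] at h1; exact h1
    · have : (0 : Int) + (k : Int) + 1 = ((k + 1 : Nat) : Int) := by omega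
      rw [this, PySem.List.pyGetD_natCast] at h2; exact h2
  · rintro ⟨k, hk, h1, h2⟩
    refine ⟨(0 : Int) + (k : Int), ⟨k, hk, rfl⟩, ?_, ?_⟩
    · have : (0 : Int) + (k : Int) = (k : Nat) := by omega
      rw [this, PySem.List.pyGetD_natCast]; exact h1
    · have : (0 : Int) + (k : Int) + 1 = ((k + 1 : Nat) : Int) := by omega
      rw [this, PySem.List.pyGetD_natCast]; exact h2

theorem icuAltGo_eq (ut : Int) (l : List Int) : ∀ (prev : Int) (hp hu : Bool),
    (hp && hu) = false →
    icuAltGo ut prev hp hu l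
      = ((hp || ((prev :: l).zip l).contains (5, 1)) && (hu || ((prev :: l).zip l).contains (9, ut))) := by
  induction l with
  | nil => intro prev hp hu h; cases hp <;> cases hu <;> simp_all [icuAltGo]
  | cons cur rest ih =>
    intro prev hp hu h
    simp only [icuAltGo, List.zip_cons_cons, List.contains_cons]
    have e5 : (((5 : Int), (1 : Int)) == (prev, cur)) = decide (prev = 5 ∧ cur = 1) := by
      apply Bool.coe_iff_coe.mp
      simp only [beq_iff_eq, decide_eq_true_eq, Prod.ext_iff]
      constructor <;> rintro ⟨h1, h2⟩ <;> exact ⟨h1.symm, h2.symm⟩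
    have e9 : (((9 : Int), ut) == (prev, cur)) = decide (prev = 9 ∧ cur = ut) := by
      apply Bool.coe_iff_coe.mp
      simp only [beq_iff_eq, decide_eq_true_eq, Prod.ext_iff]
      constructor <;> rintro ⟨h1, h2⟩ <;> exact ⟨h1.symm, h2.symm⟩
    rw [e5, e9]
    by_cases hP : prev = 5 ∧ cur = 1 <;> by_cases hU : prev = 9 ∧ cur = ut
    · exact absurd (hP.1.symm.trans hU.1) (by norm_num)
    · simp only [if_pos hP, if_neg hU]
      cases hu with
      | true => simp; exact Or.inr (Or.inl hP)
      | false =>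
        rw [if_neg (by simp), ih cur true false rfl]
        simp [hP.1, hP.2]
    · simp only [if_neg hP, if_pos hU]
      cases hp with
      | true => simp; exact Or.inr (Or.inl hU)
      | false =>
        rw [if_neg (by simp), ih cur false true rfl]
        simp [hU.1, hU.2]
    · simp only [if_neg hP, if_neg hU]
      rw [if_neg (by simp [h]), ih cur hp hu h]
      simp [hP, hU]

-- ===== VERDICT (by name: the statement is the Claim_ definition above) =====
theorem is_confirmed_usage_py_spec : Claim_equal_is_confirmed_usage_py := by
  intro rd ut _
  unfold Spec_is_confirmed_usage_py is_confirmed_usage_py is_confirmed_usage_py_alt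
  match rd with
  | [] => simp
  | prev :: rest =>
    simp only [reduceCtorEq, if_false]
    rw [scan_eq_contains, scan_eq_contains, icuAltGo_eq ut rest prev false false rfl]
    simp [List.tail_cons]
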